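-- pv_equiv track=rewrite | github.com/edwcrtn/new-doss-othello | DERNIERE_VERSION.py | bestb
-- ===== SOURCE A (Python) =====
-- bordg=[0,8,16,24,32,40,48,56]     #bord gauche
--
-- bordd=[7,15,23,31,39,47,55,63]      #bord droit
--
-- def recursifb(lb,lw,cp,i,j,a,b):                                    #fonction recursive qui retourne la case sur laquelle peut jouer le joueur noir pour une certaine case de départ
--     if i+j*(a-2) in bordd:                     #et une certaine direction j    renvoie None si pas de coup possible
--         if j in [-7,+1,+9]:
--             return None                                                 #ma petite fierté cette fonction
--     if i+j*(a-2) in bordg: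
--         if j in [-9,-1,+7]:
--             return None
--     if i+j*b in lw:
--         if i+j*a not in cp:
--             if i+j*a not in lb:
--                 if i+j*a not in lw :
--                     if i+j*b in bordd:
--                         if j in [-7,+1,+9]:
--                             return None
--                     if i+j*b in bordg:
--                         if j in [-9,-1,+7]:
--                             return None
--                     return i+j*a
--     if i+j*b in lw:
--         if i+j*a not in cp:
--             if i+j*a not in lb:
--                 if i+j*a in lw:
--                     a+=1
--                     b+=1
--                     return(recursifb(lb,lw,cp,i,j,a,b))
--
-- def cpb(lbl,lwh):                                                  #fonction qui appelle la fonction récursive de la couleur associée (noir)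
--     cpo=[]                                                         #pour chaque case noir elle appelle la fonction recursive
--     for i in lbl:                                                  #et l'ajoute à la liste de coup possible cpo
--         for j in (-9,-8,-7,-1,+1,+7,+8,+9):
--             if recursifb(lbl,lwh,cpo,i,j,2,1) != None:
--                 v=recursifb(lbl,lwh,cpo,i,j,2,1)
--                 if v in range(64):
--                     cpo.append(v)
--     return cpo
--
-- def pionsprisb(lw,lb,coup,j,a=2,b=1):
--     case = coup
--     if case+j*a not in range(64):
--         return None
--     if case+j*a not in lw:
--         if case+j*a not in lb:
--             return None
--     if case+j*a in lb:
--         return b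
--     else:
--         a+=1
--         b+=1
--         return(pionsprisb(lw,lb,coup,j,a,b))
--
-- def bestb(lb,lw):                                                    #renvoie le coup qui prend le plus de pion d'un coup
--     max={"coup":None,"points":0}
--     for coup in cpb(lb,lw):
--         for j in (-9,-8,-7,-1,+1,+7,+8,+9):
--             if pionsprisb(lw,lb,coup,j) !=None:
--                 if pionsprisb(lw,lb,coup,j)>max["points"]:
--                     max["coup"]=coup
--                     max["points"]=pionsprisb(lw,lb,coup,j)
--     return max["coup"]
-- ===== SOURCE B (Python) =====
-- bordg = [0, 8, 16, 24, 32, 40, 48, 56]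
-- bordd = [7, 15, 23, 31, 39, 47, 55, 63]
--
-- DIRS = (-9, -8, -7, -1, +1, +7, +8, +9)
--
--
-- def _reachb(lb, lw, cp, i, j):
--     # walk outward keeping the three relevant positions as pointers (no counters)
--     prev2 = i          # i + j*(a-2) with a starting at 2
--     prev1 = i + j      # i + j*b with b starting at 1
--     cur = i + 2 * j    # i + j*a
--     while True:
--         if prev2 in bordd and j in (-7, 1, 9):
--             return None
--         if prev2 in bordg and j in (-9, -1, 7):
--             return None
--         if prev1 not in lw or cur in cp or cur in lb:
--             return None
--         if cur not in lw:
--             if prev1 in bordd and j in (-7, 1, 9):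
--                 return None
--             if prev1 in bordg and j in (-9, -1, 7):
--                 return None
--             return cur
--         prev2, prev1, cur = prev1, cur, cur + j
--
--
-- def _movesb(lb, lw):
--     cpo = []
--     for i in lb:
--         for j in DIRS:
--             v = _reachb(lb, lw, cpo, i, j)
--             if v is not None and 0 <= v < 64:
--                 cpo.append(v)
--     return cpo
--
--
-- def _flipsb(lw, lb, coup, j):
--     # count consecutive opponent pieces, pointer-stepping instead of recursion
--     p = coup + 2 * j
--     n = 1
--     while True:
--         if p < 0 or p > 63:
--             return None
--         if p in lb:
--             return n
--         if p not in lw: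
--             return None
--         p += j
--         n += 1
--
--
-- def bestb(lb, lw):
--     best = None
--     pts = 0
--     for coup in _movesb(lb, lw):
--         m = 0
--         for j in DIRS:
--             v = _flipsb(lw, lb, coup, j)
--             if v is not None and v > m:
--                 m = v
--         if m > pts:
--             best = coup
--             pts = m
--     return best
-- ===== Notes on version B (the rewrite author's own statement) =====
-- stated objective: alternative
-- what changed: The two tail-recursive scans are rewritten as iterative pointer-stepping loops (positions updated by += j instead of recomputed by counter multiplication), each direction's flip count is evaluated once instead of three times, and the best move is chosen by folding a per-move maximum against the running best instead of updating the running max inside the direction loop.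
import Mathlib
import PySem

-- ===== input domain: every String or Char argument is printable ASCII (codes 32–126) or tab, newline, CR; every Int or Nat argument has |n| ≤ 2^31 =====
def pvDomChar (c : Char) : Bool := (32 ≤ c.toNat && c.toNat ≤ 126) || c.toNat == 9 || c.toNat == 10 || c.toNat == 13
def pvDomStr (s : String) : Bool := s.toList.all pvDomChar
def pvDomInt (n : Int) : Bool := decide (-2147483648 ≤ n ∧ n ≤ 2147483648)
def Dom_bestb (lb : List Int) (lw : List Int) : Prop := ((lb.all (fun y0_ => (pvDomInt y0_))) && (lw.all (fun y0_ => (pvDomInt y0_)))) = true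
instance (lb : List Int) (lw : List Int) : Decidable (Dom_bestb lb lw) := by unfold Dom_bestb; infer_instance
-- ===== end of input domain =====

-- B rewrites the two tail-recursive scans as pointer-stepping loops (positions updated by += j
-- instead of counter multiplication), evaluates each direction once, and folds a per-move maximum
-- against the running best; objective: alternative (same asymptotic cost). Return-value equivalence only.

-- ===== PORT A =====
def pvBordg : List Int := [0, 8, 16, 24, 32, 40, 48, 56]
def pvBordd : List Int := [7, 15, 23, 31, 39, 47, 55, 63]
def pvDirs : List Int := [-9, -8, -7, -1, 1, 7, 8, 9]

-- fuel: each recursive call of the Python requires i+j*a ∈ lw, and the visited positions are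
-- strictly monotone hence pairwise distinct, so the depth is ≤ lw.length; fuel lw.length+1 is exact.
def recursifbA (lb lw cp : List Int) (i j a b : Int) : Nat → Option Int
  | 0 => none
  | fuel+1 =>
    if (i + j * (a - 2)) ∈ pvBordd ∧ (j = -7 ∨ j = 1 ∨ j = 9) then none
    else if (i + j * (a - 2)) ∈ pvBordg ∧ (j = -9 ∨ j = -1 ∨ j = 7) then none
    else if (i + j * b) ∈ lw ∧ (i + j * a) ∉ cp ∧ (i + j * a) ∉ lb then
      if (i + j * a) ∉ lw then
        if (i + j * b) ∈ pvBordd ∧ (j = -7 ∨ j = 1 ∨ j = 9) then none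
        else if (i + j * b) ∈ pvBordg ∧ (j = -9 ∨ j = -1 ∨ j = 7) then none
        else some (i + j * a)
      else recursifbA lb lw cp i j (a + 1) (b + 1) fuel
    else none

def cpbA (lbl lwh : List Int) : List Int :=
  lbl.foldl (fun cpo i =>
    pvDirs.foldl (fun cpo j =>
      match recursifbA lbl lwh cpo i j 2 1 (lwh.length + 1) with
      | none => cpo
      | some v => if 0 ≤ v ∧ v < 64 then cpo ++ [v] else cpo) cpo) []

-- fuel: same argument, each recursive call requires coup+j*a ∈ lw at a fresh position.
def pionsprisbA (lw lb : List Int) (coup j a b : Int) : Nat → Option Int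
  | 0 => none
  | fuel+1 =>
    if ¬(0 ≤ coup + j * a ∧ coup + j * a < 64) then none
    else if (coup + j * a) ∉ lw ∧ (coup + j * a) ∉ lb then none
    else if (coup + j * a) ∈ lb then some b
    else pionsprisbA lw lb coup j (a + 1) (b + 1) fuel

def innerA (lw lb : List Int) (coup : Int) (mx : Option Int × Int) : Option Int × Int :=
  pvDirs.foldl (fun mx j =>
    match pionsprisbA lw lb coup j 2 1 (lw.length + 1) with
    | none => mx
    | some p => if p > mx.2 then (some coup, p) else mx) mx

def bestb (lb : List Int) (lw : List Int) : Option Int :=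
  ((cpbA lb lw).foldl (fun mx coup => innerA lw lb coup mx) ((none : Option Int), (0 : Int))).1

-- ===== PORT B =====
-- while-loop over three position pointers; fuel as for A (each iteration needs cur ∈ lw, fresh position)
def reachB (lb lw cp : List Int) (prev2 prev1 cur j : Int) : Nat → Option Int
  | 0 => none
  | fuel+1 =>
    if prev2 ∈ pvBordd ∧ (j = -7 ∨ j = 1 ∨ j = 9) then none
    else if prev2 ∈ pvBordg ∧ (j = -9 ∨ j = -1 ∨ j = 7) then none
    else if prev1 ∉ lw ∨ cur ∈ cp ∨ cur ∈ lb then none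
    else if cur ∉ lw then
      if prev1 ∈ pvBordd ∧ (j = -7 ∨ j = 1 ∨ j = 9) then none
      else if prev1 ∈ pvBordg ∧ (j = -9 ∨ j = -1 ∨ j = 7) then none
      else some cur
    else reachB lb lw cp prev1 cur (cur + j) j fuel

def movesB (lb lw : List Int) : List Int :=
  lb.foldl (fun cpo i =>
    pvDirs.foldl (fun cpo j =>
      match reachB lb lw cpo i (i + j) (i + 2 * j) j (lw.length + 1) with
      | none => cpo
      | some v => if 0 ≤ v ∧ v < 64 then cpo ++ [v] else cpo) cpo) []

-- while-loop stepping a single position pointer and a counter; fuel as for A's pionsprisb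
def flipsB (lw lb : List Int) (p n j : Int) : Nat → Option Int
  | 0 => none
  | fuel+1 =>
    if p < 0 ∨ p > 63 then none
    else if p ∈ lb then some n
    else if p ∉ lw then none
    else flipsB lw lb (p + j) (n + 1) j fuel

def dirmaxB (lw lb : List Int) (coup : Int) : Int :=
  pvDirs.foldl (fun m j =>
    match flipsB lw lb (coup + 2 * j) 1 j (lw.length + 1) with
    | none => m
    | some v => if v > m then v else m) 0

def bestb_alt (lb : List Int) (lw : List Int) : Option Int :=
  ((movesB lb lw).foldl (fun (st : Option Int × Int) coup =>
      let m := dirmaxB lw lb coup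
      if m > st.2 then (some coup, m) else st)
    ((none : Option Int), (0 : Int))).1

-- ===== PRECONDITION & SPEC =====
def Spec_bestb (lb : List Int) (lw : List Int) (out : Option Int) : Prop := out = bestb_alt lb lw
instance (lb : List Int) (lw : List Int) (out : Option Int) : Decidable (Spec_bestb lb lw out) := by unfold Spec_bestb; infer_instance

-- ===== CLAIM (what is proved, stated in full; the proofs are below) =====
def Claim_equal_bestb : Prop := ∀ (lb : List Int) (lw : List Int), Dom_bestb lb lw → Spec_bestb lb lw (bestb lb lw)

-- ===== LEMMAS AND PROOFS =====

theorem flips_eq (fuel : Nat) : ∀ (lw lb : List Int) (coup j a b : Int),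
    flipsB lw lb (coup + j * a) b j fuel = pionsprisbA lw lb coup j a b fuel := by
  induction fuel with
  | zero => intros; rfl
  | succ f ih =>
    intro lw lb coup j a b
    simp only [flipsB, pionsprisbA]
    by_cases hr : 0 ≤ coup + j * a ∧ coup + j * a < 64
    · have hr' : ¬(coup + j * a < 0 ∨ coup + j * a > 63) := by omega
      by_cases hb : (coup + j * a) ∈ lb
      · simp [hr, hr', hb]
      · by_cases hw : (coup + j * a) ∈ lw
        · have : (coup + j * a) + j = coup + j * (a + 1) := by ring
          simp [hr, hr', hb, hw, this, ih]
        · simp [hr, hr', hb, hw]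
    · have hr' : coup + j * a < 0 ∨ coup + j * a > 63 := by omega
      simp [hr, hr']

theorem reach_eq (fuel : Nat) : ∀ (lb lw cp : List Int) (i j a : Int),
    reachB lb lw cp (i + j * (a - 2)) (i + j * (a - 1)) (i + j * a) j fuel
      = recursifbA lb lw cp i j a (a - 1) fuel := by
  induction fuel with
  | zero => intros; rfl
  | succ f ih =>
    intro lb lw cp i j a
    simp only [reachB, recursifbA]
    by_cases h1 : (i + j * (a - 2)) ∈ pvBordd ∧ (j = -7 ∨ j = 1 ∨ j = 9)
    · simp [h1]
    · by_cases h2 : (i + j * (a - 2)) ∈ pvBordg ∧ (j = -9 ∨ j = -1 ∨ j = 7)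
      · simp [h1, h2]
      · by_cases h3 : (i + j * (a - 1)) ∈ lw ∧ (i + j * a) ∉ cp ∧ (i + j * a) ∉ lb
        · by_cases h4 : (i + j * a) ∈ lw
          · have hnone : ¬((i + j * (a - 1)) ∉ lw ∨ (i + j * a) ∈ cp ∨ (i + j * a) ∈ lb) := by
              tauto
            simp only [if_neg h1, if_neg h2, if_neg hnone, if_pos h3,
              if_neg (not_not_intro h4)]
            have e4 : (a - 1) + 1 = (a + 1) - 1 := by ring
            rw [e4]
            have h := ih lb lw cp i j (a + 1)
            have e1 : i + j * ((a + 1) - 2) = i + j * (a - 1) := by ring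
            have e2 : i + j * ((a + 1) - 1) = i + j * a := by ring
            have e3 : i + j * (a + 1) = i + j * a + j := by ring
            rw [e1, e2, e3] at h
            exact h
          · have hnone : ¬((i + j * (a - 1)) ∉ lw ∨ (i + j * a) ∈ cp ∨ (i + j * a) ∈ lb) := by
              tauto
            simp [h1, h2, h3, h4]
        · have hnone : (i + j * (a - 1)) ∉ lw ∨ (i + j * a) ∈ cp ∨ (i + j * a) ∈ lb := by
            tauto
          simp [h1, h2, h3, hnone]

theorem moves_eq (lb lw : List Int) : movesB lb lw = cpbA lb lw := by
  unfold movesB cpbA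
  congr 1
  funext cpo i
  congr 1
  funext cpo' j
  have h := reach_eq (lw.length + 1) lb lw cpo' i j 2
  have e1 : i + j * ((2 : Int) - 2) = i := by ring
  have e2 : i + j * ((2 : Int) - 1) = i + j := by ring
  have e3 : i + j * (2 : Int) = i + 2 * j := by ring
  rw [e1, e2, e3] at h
  norm_num at h
  rw [h]

-- generic per-direction running maximum (proof-only helper)
def MvFold (v : Int → Option Int) (ds : List Int) (m : Int) : Int :=
  ds.foldl (fun m j => match v j with | none => m | some x => if x > m then x else m) m

theorem Mv_ge (v : Int → Option Int) (ds : List Int) : ∀ m : Int, m ≤ MvFold v ds m := by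
  induction ds with
  | nil => intro m; simp [MvFold]
  | cons j t ih =>
    intro m
    simp only [MvFold, List.foldl]
    cases hv : v j with
    | none => simpa [MvFold] using ih m
    | some x =>
      have h1 : m ≤ (if x > m then x else m) := by split <;> omega
      exact le_trans h1 (ih _)

theorem Mv_max (v : Int → Option Int) (ds : List Int) :
    ∀ a b : Int, MvFold v ds (max a b) = max (MvFold v ds a) b := by
  induction ds with
  | nil => intro a b; simp [MvFold]
  | cons j t ih =>
    intro a b
    simp only [MvFold, List.foldl]
    cases hv : v j with
    | none => exact ih a b
    | some x =>
      dsimp only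
      have e : (if x > max a b then x else max a b) = max (if x > a then x else a) b := by
        split_ifs <;> omega
      rw [e]
      exact ih _ b

theorem foldA_eq (v : Int → Option Int) (c : Option Int) (ds : List Int) :
    ∀ (best : Option Int) (pts : Int),
      ds.foldl (fun (mx : Option Int × Int) j =>
          match v j with
          | none => mx
          | some p => if p > mx.2 then (c, p) else mx) (best, pts)
        = (if MvFold v ds pts > pts then c else best, MvFold v ds pts) := by
  induction ds with
  | nil => intro best pts; simp [MvFold]
  | cons j t ih =>
    cases ho : v j with
    | none =>
      intro best pts
      have hM : MvFold v (j :: t) pts = MvFold v t pts := by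
        simp [MvFold, List.foldl_cons, ho]
      rw [hM]
      simp only [List.foldl_cons]
      rw [ho]
      exact ih best pts
    | some x =>
      intro best pts
      have hM : MvFold v (j :: t) pts = MvFold v t (if x > pts then x else pts) := by
        simp [MvFold, List.foldl_cons, ho]
      rw [hM]
      simp only [List.foldl_cons]
      rw [ho]
      dsimp only
      by_cases hx : x > pts
      · simp only [if_pos hx]
        rw [ih c x]
        have h1 : pts < MvFold v t x := lt_of_lt_of_le hx (Mv_ge v t x)
        simp only [ite_self, if_pos h1]
      · simp only [if_neg hx]
        exact ih best pts

theorem dirmaxB_eq (lw lb : List Int) (coup : Int) :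
    dirmaxB lw lb coup
      = MvFold (fun j => pionsprisbA lw lb coup j 2 1 (lw.length + 1)) pvDirs 0 := by
  unfold dirmaxB MvFold
  congr 1
  funext m j
  rw [show coup + 2 * j = coup + j * 2 by ring, flips_eq]

theorem innerA_eq (lw lb : List Int) (coup : Int) (best : Option Int) (pts : Int)
    (h : 0 ≤ pts) :
    innerA lw lb coup (best, pts)
      = (if dirmaxB lw lb coup > pts then (some coup, dirmaxB lw lb coup) else (best, pts)) := by
  set v := fun j => pionsprisbA lw lb coup j 2 1 (lw.length + 1) with hv
  have hA : innerA lw lb coup (best, pts)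
      = (if MvFold v pvDirs pts > pts then some coup else best, MvFold v pvDirs pts) := by
    unfold innerA
    exact foldA_eq v (some coup) pvDirs best pts
  have hmax : MvFold v pvDirs pts = max (MvFold v pvDirs 0) pts := by
    have := Mv_max v pvDirs 0 pts
    rwa [max_eq_right h] at this
  rw [hA, hmax, dirmaxB_eq lw lb coup, ← hv]
  by_cases hm : MvFold v pvDirs 0 > pts
  · have : max (MvFold v pvDirs 0) pts = MvFold v pvDirs 0 := by omega
    simp [hm, this]
  · have : max (MvFold v pvDirs 0) pts = pts := by omega
    simp [hm, this]

theorem outer_eq (lw lb : List Int) (coups : List Int) :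
    ∀ (best : Option Int) (pts : Int), 0 ≤ pts →
      coups.foldl (fun mx coup => innerA lw lb coup mx) (best, pts)
        = coups.foldl (fun (st : Option Int × Int) coup =>
            let m := dirmaxB lw lb coup
            if m > st.2 then (some coup, m) else st) (best, pts) := by
  induction coups with
  | nil => intros; rfl
  | cons c t ih =>
    intro best pts h
    simp only [List.foldl]
    rw [innerA_eq lw lb c best pts h]
    by_cases hm : dirmaxB lw lb c > pts
    · simp only [hm, if_pos]
      exact ih (some c) (dirmaxB lw lb c) (by omega)
    · simp only [hm, if_false]
      exact ih best pts h

theorem bestb_eq (lb lw : List Int) : bestb lb lw = bestb_alt lb lw := by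
  unfold bestb bestb_alt
  rw [moves_eq, outer_eq lw lb (cpbA lb lw) none 0 le_rfl]

-- ===== VERDICT (by name: the statement is the Claim_ definition above) =====
theorem bestb_spec : Claim_equal_bestb := by
  intro lb lw _
  unfold Spec_bestb
  exact bestb_eq lb lw
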